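-- pv_equiv track=rewrite | github.com/arcwell-foundry/Aria | backend/src/skills/orchestrator.py | _risk_from_data_classes
-- ===== SOURCE A (Python) =====
-- _RISK_ORDER = {"low": 0, "medium": 1, "high": 2, "critical": 3}
--
-- def _risk_from_data_classes(data_classes: list[str]) -> str:
--     """Calculate risk level from data classes accessed.
--
--     Args:
--         data_classes: List of data class names (e.g., ["PUBLIC", "INTERNAL"]).
--
--     Returns:
--         Risk level string: "low", "medium", "high", or "critical".
--     """
--     class_risk = {
--         "PUBLIC": "low",
--         "INTERNAL": "medium",
--         "CONFIDENTIAL": "high",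
--         "RESTRICTED": "critical",
--         "REGULATED": "critical",
--     }
--     max_risk = "low"
--     for dc in data_classes:
--         risk = class_risk.get(dc.upper(), "low")
--         if _RISK_ORDER.get(risk, 0) > _RISK_ORDER.get(max_risk, 0):
--             max_risk = risk
--     return max_risk
-- ===== SOURCE B (Python) =====
-- def _risk_from_data_classes(data_classes: list[str]) -> str:
--     """Calculate risk level from data classes accessed (priority short-circuit)."""
--     seen = {dc.upper() for dc in data_classes}
--     if seen & {"RESTRICTED", "REGULATED"}:
--         return "critical"
--     if "CONFIDENTIAL" in seen:
--         return "high"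
--     if "INTERNAL" in seen:
--         return "medium"
--     return "low"
-- ===== Notes on version B (the rewrite author's own statement) =====
-- stated objective: simpler
-- what changed: Replaces the running-max loop over two risk-order dicts with one pass building a set of uppercased class names followed by fixed priority-ordered membership tests (critical/high/medium short-circuit chain).
import Mathlib
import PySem

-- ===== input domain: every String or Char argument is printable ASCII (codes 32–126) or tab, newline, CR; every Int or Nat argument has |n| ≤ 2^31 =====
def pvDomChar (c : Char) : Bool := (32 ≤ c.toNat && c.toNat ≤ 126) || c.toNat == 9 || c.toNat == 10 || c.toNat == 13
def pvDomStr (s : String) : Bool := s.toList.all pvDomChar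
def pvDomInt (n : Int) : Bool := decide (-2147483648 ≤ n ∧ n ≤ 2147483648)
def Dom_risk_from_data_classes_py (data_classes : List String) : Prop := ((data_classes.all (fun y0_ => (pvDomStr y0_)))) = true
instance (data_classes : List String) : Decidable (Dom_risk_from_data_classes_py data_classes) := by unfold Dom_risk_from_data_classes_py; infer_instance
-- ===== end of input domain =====

-- B replaces A's running-max loop over two risk-order dicts with a set of uppercased
-- names plus fixed priority-ordered membership tests (objective: simpler).

-- ===== PORT A =====
def pvRiskOrder : PySem.Dict String Int :=
  PySem.Dict.ofList [("low", 0), ("medium", 1), ("high", 2), ("critical", 3)]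

def pvClassRisk : PySem.Dict String String :=
  PySem.Dict.ofList [("PUBLIC", "low"), ("INTERNAL", "medium"), ("CONFIDENTIAL", "high"),
   ("RESTRICTED", "critical"), ("REGULATED", "critical")]

def risk_from_data_classes_py (data_classes : List String) : String :=
  data_classes.foldl
    (fun max_risk dc =>
      let risk := PySem.Dict.getD pvClassRisk (PySem.Str.upper dc) "low"
      if PySem.Dict.getD pvRiskOrder risk 0 > PySem.Dict.getD pvRiskOrder max_risk 0
      then risk else max_risk)
    "low"

-- ===== PORT B =====
def risk_from_data_classes_py_alt (data_classes : List String) : String :=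
  let seen : PySem.Set String := PySem.Set.ofList (data_classes.map PySem.Str.upper)
  if PySem.Set.inter seen (PySem.Set.ofList ["RESTRICTED", "REGULATED"]) ≠ [] then "critical"
  else if PySem.Set.contains seen "CONFIDENTIAL" then "high"
  else if PySem.Set.contains seen "INTERNAL" then "medium"
  else "low"

-- ===== PRECONDITION & SPEC =====
def Spec_risk_from_data_classes_py (data_classes : List String) (out : String) : Prop := out = risk_from_data_classes_py_alt data_classes
instance (data_classes : List String) (out : String) : Decidable (Spec_risk_from_data_classes_py data_classes out) := by unfold Spec_risk_from_data_classes_py; infer_instance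

-- ===== CLAIM (what is proved, stated in full; the proofs are below) =====
def Claim_equal_risk_from_data_classes_py : Prop := ∀ (data_classes : List String), Dom_risk_from_data_classes_py data_classes → Spec_risk_from_data_classes_py data_classes (risk_from_data_classes_py data_classes)

-- ===== LEMMAS AND PROOFS =====

-- numeric rank of the four risk strings, and its inverse
def pvRank (s : String) : Nat :=
  if s = "critical" then 3 else if s = "high" then 2 else if s = "medium" then 1 else 0

def pvToRisk (n : Nat) : String :=
  if n = 3 then "critical" else if n = 2 then "high" else if n = 1 then "medium" else "low"

-- the per-element risk A assigns, and the max rank of a list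
def pvG (dc : String) : String := PySem.Dict.getD pvClassRisk (PySem.Str.upper dc) "low"

def pvM (l : List String) : Nat := l.foldr (fun dc n => max (pvRank (pvG dc)) n) 0

lemma pvG_char (dc : String) :
    pvG dc = if PySem.Str.upper dc = "RESTRICTED" ∨ PySem.Str.upper dc = "REGULATED" then "critical"
      else if PySem.Str.upper dc = "CONFIDENTIAL" then "high"
      else if PySem.Str.upper dc = "INTERNAL" then "medium"
      else "low" := by
  unfold pvG
  rw [show pvClassRisk = PySem.Dict.mk [("PUBLIC", "low"), ("INTERNAL", "medium"), ("CONFIDENTIAL", "high"),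
      ("RESTRICTED", "critical"), ("REGULATED", "critical")] from by decide]
  simp only [PySem.Dict.getD, PySem.Dict.get?, List.find?_cons, List.find?_nil]
  generalize PySem.Str.upper dc = u
  by_cases h1 : u = "RESTRICTED"
  · subst h1; decide
  by_cases h2 : u = "REGULATED"
  · subst h2; decide
  by_cases h3 : u = "CONFIDENTIAL"
  · subst h3; decide
  by_cases h4 : u = "INTERNAL"
  · subst h4; decide
  by_cases h5 : u = "PUBLIC"
  · subst h5; decide
  rw [if_neg (by tauto), if_neg h3, if_neg h4,
    show ("PUBLIC" == u) = false from beq_eq_false_iff_ne.mpr (fun e => h5 e.symm),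
    show ("INTERNAL" == u) = false from beq_eq_false_iff_ne.mpr (fun e => h4 e.symm),
    show ("CONFIDENTIAL" == u) = false from beq_eq_false_iff_ne.mpr (fun e => h3 e.symm),
    show ("RESTRICTED" == u) = false from beq_eq_false_iff_ne.mpr (fun e => h1 e.symm),
    show ("REGULATED" == u) = false from beq_eq_false_iff_ne.mpr (fun e => h2 e.symm)]
  rfl

lemma pvG_cases (dc : String) :
    pvG dc = "low" ∨ pvG dc = "medium" ∨ pvG dc = "high" ∨ pvG dc = "critical" := by
  rw [pvG_char]; split_ifs <;> simp

lemma pvToRisk_rank_g (dc : String) : pvToRisk (pvRank (pvG dc)) = pvG dc := by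
  rcases pvG_cases dc with h | h | h | h <;> rw [h] <;> decide

lemma pvOrder_getD (s : String) : PySem.Dict.getD pvRiskOrder s 0 = (pvRank s : Int) := by
  rw [show pvRiskOrder = PySem.Dict.mk [("low", 0), ("medium", 1), ("high", 2), ("critical", 3)] from by decide]
  simp only [PySem.Dict.getD, PySem.Dict.get?, List.find?_cons, List.find?_nil]
  unfold pvRank
  by_cases h1 : s = "low"
  · subst h1; decide
  by_cases h2 : s = "medium"
  · subst h2; decide
  by_cases h3 : s = "high"
  · subst h3; decide
  by_cases h4 : s = "critical"
  · subst h4; decide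
  rw [show ("low" == s) = false from beq_eq_false_iff_ne.mpr (fun e => h1 e.symm),
      show ("medium" == s) = false from beq_eq_false_iff_ne.mpr (fun e => h2 e.symm),
      show ("high" == s) = false from beq_eq_false_iff_ne.mpr (fun e => h3 e.symm),
      show ("critical" == s) = false from beq_eq_false_iff_ne.mpr (fun e => h4 e.symm),
      if_neg h4, if_neg h3, if_neg h2]
  rfl

lemma pvRank_toRisk (n : Nat) (hn : n ≤ 3) : pvRank (pvToRisk n) = n := by
  interval_cases n <;> decide

lemma pvRank_g_le (dc : String) : pvRank (pvG dc) ≤ 3 := by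
  rcases pvG_cases dc with h | h | h | h <;> rw [h] <;> decide

lemma pvM_cons (dc : String) (l : List String) : pvM (dc :: l) = max (pvRank (pvG dc)) (pvM l) := rfl

lemma pvM_le (l : List String) : pvM l ≤ 3 := by
  induction l with
  | nil => decide
  | cons dc l ih => rw [pvM_cons]; exact max_le (pvRank_g_le dc) ih

lemma pvA_fold (l : List String) : ∀ a : Nat, a ≤ 3 →
    l.foldl
      (fun max_risk dc =>
        let risk := PySem.Dict.getD pvClassRisk (PySem.Str.upper dc) "low"
        if PySem.Dict.getD pvRiskOrder risk 0 > PySem.Dict.getD pvRiskOrder max_risk 0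
        then risk else max_risk)
      (pvToRisk a) = pvToRisk (max a (pvM l)) := by
  induction l with
  | nil => intro a _; simp [pvM]
  | cons dc l ih =>
      intro a ha
      have hstep :
          (if PySem.Dict.getD pvRiskOrder (pvG dc) 0 > PySem.Dict.getD pvRiskOrder (pvToRisk a) 0
           then pvG dc else pvToRisk a) = pvToRisk (max a (pvRank (pvG dc))) := by
        rw [pvOrder_getD, pvOrder_getD, pvRank_toRisk a ha]
        by_cases h : pvRank (pvG dc) > a
        · rw [if_pos (by exact_mod_cast h), max_eq_right (le_of_lt h), pvToRisk_rank_g]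
        · rw [if_neg (by exact_mod_cast h), max_eq_left (by omega)]
      simp only [List.foldl]
      show List.foldl _ (if PySem.Dict.getD pvRiskOrder (pvG dc) 0 > PySem.Dict.getD pvRiskOrder (pvToRisk a) 0 then pvG dc else pvToRisk a) l = _
      rw [hstep, ih _ (max_le ha (pvRank_g_le dc)), pvM_cons]
      congr 1
      omega

lemma pvA_eq (l : List String) : risk_from_data_classes_py l = pvToRisk (pvM l) := by
  have h := pvA_fold l 0 (by omega)
  simpa [risk_from_data_classes_py] using h

lemma pvRank_ge_mem (l : List String) (k : Nat) :
    (∃ dc ∈ l, k ≤ pvRank (pvG dc)) → k ≤ pvM l := by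
  rintro ⟨dc, hmem, hk⟩
  induction l with
  | nil => cases hmem
  | cons x l ih =>
      rw [pvM_cons]
      rcases List.mem_cons.mp hmem with h | h
      · subst h; exact le_trans hk (le_max_left _ _)
      · exact le_trans (ih h) (le_max_right _ _)

lemma pvM_le_of (l : List String) (k : Nat) :
    (∀ dc ∈ l, pvRank (pvG dc) ≤ k) → pvM l ≤ k := by
  intro h
  induction l with
  | nil => simp [pvM]
  | cons x l ih =>
      rw [pvM_cons]
      exact max_le (h x (List.mem_cons_self ..)) (ih fun dc hd => h dc (List.mem_cons_of_mem _ hd))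

lemma pvSet_mem (l : List String) (x : String) :
    PySem.Set.contains (PySem.Set.ofList (l.map PySem.Str.upper)) x = true ↔
      ∃ dc ∈ l, PySem.Str.upper dc = x := by
  constructor
  · intro h
    have h1 : x ∈ PySem.Set.ofList (l.map PySem.Str.upper) := by
      simpa [PySem.Set.contains] using h
    rcases List.mem_map.mp ((PySem.Set.mem_ofList _ _).mp h1) with ⟨dc, hd, he⟩
    exact ⟨dc, hd, he⟩
  · rintro ⟨dc, hd, he⟩
    have h1 : x ∈ PySem.Set.ofList (l.map PySem.Str.upper) :=
      (PySem.Set.mem_ofList _ _).mpr (List.mem_map.mpr ⟨dc, hd, he⟩)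
    simpa [PySem.Set.contains] using h1

lemma pvInter_ne (l : List String) :
    PySem.Set.inter (PySem.Set.ofList (l.map PySem.Str.upper))
        (PySem.Set.ofList ["RESTRICTED", "REGULATED"]) ≠ ([] : List String) ↔
      ∃ dc ∈ l, PySem.Str.upper dc = "RESTRICTED" ∨ PySem.Str.upper dc = "REGULATED" := by
  rw [Ne, PySem.Set.inter, List.filter_eq_nil_iff]
  constructor
  · intro h
    by_contra hne
    apply h
    intro x hx hcont
    rcases List.mem_map.mp ((PySem.Set.mem_ofList _ _).mp hx) with ⟨dc, hd, he⟩
    have hx2 : x ∈ (PySem.Set.ofList ["RESTRICTED", "REGULATED"] : List String) := by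
      simpa [PySem.Set.contains] using hcont
    have hx3 : x = "RESTRICTED" ∨ x = "REGULATED" := by
      have := (PySem.Set.mem_ofList _ _).mp hx2
      simpa using this
    exact hne ⟨dc, hd, he ▸ hx3⟩
  · rintro ⟨dc, hd, he⟩ h
    have hmem : PySem.Str.upper dc ∈ PySem.Set.ofList (l.map PySem.Str.upper) :=
      (PySem.Set.mem_ofList _ _).mpr (List.mem_map.mpr ⟨dc, hd, rfl⟩)
    refine h _ hmem ?_
    rcases he with h1 | h1 <;> rw [h1] <;> decide

lemma pvRank_eq3 (dc : String) :
    3 ≤ pvRank (pvG dc) ↔ (PySem.Str.upper dc = "RESTRICTED" ∨ PySem.Str.upper dc = "REGULATED") := by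
  rw [pvG_char]
  split_ifs with h1 h2 h3 <;> simp_all [pvRank]

lemma pvRank_eq2 (dc : String) :
    2 ≤ pvRank (pvG dc) ↔ (PySem.Str.upper dc = "RESTRICTED" ∨ PySem.Str.upper dc = "REGULATED" ∨ PySem.Str.upper dc = "CONFIDENTIAL") := by
  rw [pvG_char]
  split_ifs with h1 h2 h3 <;> simp_all [pvRank] <;> tauto

lemma pvRank_eq1 (dc : String) :
    1 ≤ pvRank (pvG dc) ↔ (PySem.Str.upper dc = "RESTRICTED" ∨ PySem.Str.upper dc = "REGULATED" ∨ PySem.Str.upper dc = "CONFIDENTIAL" ∨ PySem.Str.upper dc = "INTERNAL") := by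
  rw [pvG_char]
  split_ifs with h1 h2 h3 <;> simp_all [pvRank] <;> tauto

lemma pvB_eq (l : List String) : risk_from_data_classes_py_alt l = pvToRisk (pvM l) := by
  unfold risk_from_data_classes_py_alt
  by_cases hc : ∃ dc ∈ l, PySem.Str.upper dc = "RESTRICTED" ∨ PySem.Str.upper dc = "REGULATED"
  · rw [if_pos ((pvInter_ne l).mpr hc)]
    have h3 : 3 ≤ pvM l := by
      rcases hc with ⟨dc, hd, he⟩
      exact pvRank_ge_mem l 3 ⟨dc, hd, (pvRank_eq3 dc).mpr he⟩
    have hle := pvM_le l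
    have hM : pvM l = 3 := by omega
    rw [hM]; rfl
  · rw [if_neg (fun h => hc ((pvInter_ne l).mp h))]
    by_cases hh : ∃ dc ∈ l, PySem.Str.upper dc = "CONFIDENTIAL"
    · rw [if_pos ((pvSet_mem l "CONFIDENTIAL").mpr hh)]
      have h2 : 2 ≤ pvM l := by
        rcases hh with ⟨dc, hd, he⟩
        exact pvRank_ge_mem l 2 ⟨dc, hd, (pvRank_eq2 dc).mpr (Or.inr (Or.inr he))⟩
      have h3 : pvM l ≤ 2 := by
        apply pvM_le_of
        intro dc hd
        by_contra hx
        rcases (pvRank_eq3 dc).mp (by omega) with h | h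
        · exact hc ⟨dc, hd, Or.inl h⟩
        · exact hc ⟨dc, hd, Or.inr h⟩
      have hM : pvM l = 2 := by omega
      rw [hM]; rfl
    · rw [if_neg (fun h => hh ((pvSet_mem l "CONFIDENTIAL").mp h))]
      by_cases hm : ∃ dc ∈ l, PySem.Str.upper dc = "INTERNAL"
      · rw [if_pos ((pvSet_mem l "INTERNAL").mpr hm)]
        have h1 : 1 ≤ pvM l := by
          rcases hm with ⟨dc, hd, he⟩
          exact pvRank_ge_mem l 1 ⟨dc, hd, (pvRank_eq1 dc).mpr (Or.inr (Or.inr (Or.inr he)))⟩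
        have h2 : pvM l ≤ 1 := by
          apply pvM_le_of
          intro dc hd
          by_contra hx
          rcases (pvRank_eq2 dc).mp (by omega) with h | h | h
          · exact hc ⟨dc, hd, Or.inl h⟩
          · exact hc ⟨dc, hd, Or.inr h⟩
          · exact hh ⟨dc, hd, h⟩
        have hM : pvM l = 1 := by omega
        rw [hM]; rfl
      · rw [if_neg (fun h => hm ((pvSet_mem l "INTERNAL").mp h))]
        have h0 : pvM l ≤ 0 := by
          apply pvM_le_of
          intro dc hd
          by_contra hx
          rcases (pvRank_eq1 dc).mp (by omega) with h | h | h | h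
          · exact hc ⟨dc, hd, Or.inl h⟩
          · exact hc ⟨dc, hd, Or.inr h⟩
          · exact hh ⟨dc, hd, h⟩
          · exact hm ⟨dc, hd, h⟩
        have hM : pvM l = 0 := by omega
        rw [hM]; rfl

-- ===== VERDICT (by name: the statement is the Claim_ definition above) =====
theorem risk_from_data_classes_py_spec : Claim_equal_risk_from_data_classes_py := by
  intro l _
  unfold Spec_risk_from_data_classes_py
  rw [pvA_eq, pvB_eq]
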